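-- pv_equiv track=rewrite | github.com/duc180701/Code_PTIT | Python/PY01041-sotanggiam.py | process
-- ===== SOURCE A (Python) =====
-- def process(s):
--     j = 0
--     for i in range(1, len(s)):
--         if s[i] <= s[i - 1]:
--             j = i
--             break
--     s1 = s[j:]
--     for i in range(1, len(s1)):
--         if s1[i] >= s1[i - 1]:
--             return False
--     return True
-- ===== SOURCE B (Python) =====
-- def process(s):
--     if not s:
--         return True
--     descending = False
--     prev = s[0]
--     for x in s[1:]:
--         if descending:
--             if x >= prev:
--                 return False
--         elif x <= prev:
--             descending = True
--         prev = x
--     return descending or len(s) <= 1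
-- ===== Notes on version B (the rewrite author's own statement) =====
-- stated objective: simpler
-- what changed: Replaces A's two-pass find-the-peak-then-rescan-a-slice decomposition by one stateful traversal carrying a 'descending' flag and the previous element, never building the s[j:] slice.
import Mathlib
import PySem

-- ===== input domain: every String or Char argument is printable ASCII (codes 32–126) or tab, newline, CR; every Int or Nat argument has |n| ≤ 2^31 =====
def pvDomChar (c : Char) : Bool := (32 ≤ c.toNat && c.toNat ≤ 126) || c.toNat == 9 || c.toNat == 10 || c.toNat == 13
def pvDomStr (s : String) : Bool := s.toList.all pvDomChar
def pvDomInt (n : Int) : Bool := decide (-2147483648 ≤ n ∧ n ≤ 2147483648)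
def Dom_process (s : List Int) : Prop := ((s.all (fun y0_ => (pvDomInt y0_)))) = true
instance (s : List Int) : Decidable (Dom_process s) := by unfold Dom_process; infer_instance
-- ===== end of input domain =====

-- B replaces A's find-peak-then-rescan-a-slice decomposition by a single stateful
-- traversal with a 'descending' flag; same results, no slice built (objective: simpler).

-- ===== PORT A =====
-- first loop: for i in range(1, len(s)): if s[i] <= s[i-1]: j = i; break
-- (range(1, len s) = List.range' 1 (len s - 1), exact; indices are always in
--  range here, so List.getD i 0 is exactly Python's s[i])
def processLoop1 (s : List Int) : List Nat → Nat
  | [] => 0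
  | i :: rest => if s.getD i 0 ≤ s.getD (i - 1) 0 then i else processLoop1 s rest

-- second loop: for i in range(1, len(s1)): if s1[i] >= s1[i-1]: return False
def processLoop2 (s1 : List Int) : List Nat → Bool
  | [] => true
  | i :: rest => if s1.getD i 0 ≥ s1.getD (i - 1) 0 then false else processLoop2 s1 rest

def process (s : List Int) : Bool :=
  let j := processLoop1 s (List.range' 1 (s.length - 1))
  -- s1 = s[j:] with 0 ≤ j ≤ len s, so the slice is exactly List.drop j
  let s1 := s.drop j
  processLoop2 s1 (List.range' 1 (s1.length - 1))

-- ===== PORT B =====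
-- the for-loop of Source B: state = (prev, descending), iterating over s[1:]
def altLoop (prev : Int) (descending : Bool) : List Int → Bool
  | [] => descending
  | x :: rest =>
    if descending then
      (if x ≥ prev then false else altLoop x descending rest)
    else if x ≤ prev then altLoop x true rest
    else altLoop x false rest

def process_alt (s : List Int) : Bool :=
  match s with
  | [] => true
  -- 'return descending or len(s) <= 1': an early 'return False' happens only with
  -- len(s) >= 2, where '|| (len ≤ 1)' is the identity, so applying it uniformly is exact
  | x :: rest => altLoop x false rest || decide (s.length ≤ 1)

-- ===== PRECONDITION & SPEC =====
def Spec_process (s : List Int) (out : Bool) : Prop := out = process_alt s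
instance (s : List Int) (out : Bool) : Decidable (Spec_process s out) := by unfold Spec_process; infer_instance

-- ===== CLAIM (what is proved, stated in full; the proofs are below) =====
def Claim_equal_process : Prop := ∀ (s : List Int), Dom_process s → Spec_process s (process s)

-- ===== LEMMAS AND PROOFS =====

-- structural characterisations of the index loops
def strictDecFrom (prev : Int) : List Int → Bool
  | [] => true
  | x :: rest => decide (x < prev) && strictDecFrom x rest

def strictDec : List Int → Bool
  | [] => true
  | x :: rest => strictDecFrom x rest

def auxFlip (prev : Int) (l : List Int) (i : Nat) : Nat :=
  match l with
  | [] => 0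
  | y :: r => if y ≤ prev then i else auxFlip y r (i + 1)

theorem loop2_general (s : List Int) :
    ∀ (m k : Nat), m = s.length - (k + 1) → k < s.length →
    processLoop2 s (List.range' (k + 1) m) = strictDecFrom (s.getD k 0) (s.drop (k + 1)) := by
  intro m
  induction m with
  | zero =>
    intro k hm _
    have hdrop : s.drop (k + 1) = [] := List.drop_eq_nil_of_le (by omega)
    simp [processLoop2, hdrop, strictDecFrom]
  | succ n ih =>
    intro k hm hk
    have hk1 : k + 1 < s.length := by omega
    have hdrop : s.drop (k + 1) = s.getD (k + 1) 0 :: s.drop (k + 2) := by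
      rw [List.getD_eq_getElem _ _ hk1]
      rw [List.drop_eq_getElem_cons hk1]
    rw [List.range'_succ]
    simp only [processLoop2, Nat.add_sub_cancel]
    rw [hdrop]
    simp only [strictDecFrom, List.getD] at *
    by_cases h : s[k + 1]?.getD 0 ≥ s[k]?.getD 0
    · simp [h, show ¬ (s[k + 1]?.getD 0 < s[k]?.getD 0) by omega]
    · have := ih (k + 1) (by omega) hk1
      rw [show k + 1 + 1 = k + 2 from rfl] at this
      simp [h, this, show s[k + 1]?.getD 0 < s[k]?.getD 0 by omega]

theorem loop2_strictDec (l : List Int) :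
    processLoop2 l (List.range' 1 (l.length - 1)) = strictDec l := by
  cases l with
  | nil => simp [processLoop2, strictDec]
  | cons x rest =>
    have h := loop2_general (x :: rest) ((x :: rest).length - 1) 0
      (by simp) (by simp)
    simpa [strictDec] using h

theorem loop1_general (s : List Int) :
    ∀ (m k : Nat), m = s.length - (k + 1) → k < s.length →
    processLoop1 s (List.range' (k + 1) m) = auxFlip (s.getD k 0) (s.drop (k + 1)) (k + 1) := by
  intro m
  induction m with
  | zero =>
    intro k hm _
    have hdrop : s.drop (k + 1) = [] := List.drop_eq_nil_of_le (by omega)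
    simp [processLoop1, hdrop, auxFlip]
  | succ n ih =>
    intro k hm hk
    have hk1 : k + 1 < s.length := by omega
    have hdrop : s.drop (k + 1) = s.getD (k + 1) 0 :: s.drop (k + 2) := by
      rw [List.getD_eq_getElem _ _ hk1]
      rw [List.drop_eq_getElem_cons hk1]
    rw [List.range'_succ]
    simp only [processLoop1, Nat.add_sub_cancel]
    rw [hdrop]
    simp only [auxFlip, List.getD] at *
    by_cases h : s[k + 1]?.getD 0 ≤ s[k]?.getD 0
    · simp [h]
    · have := ih (k + 1) (by omega) hk1
      rw [show k + 1 + 1 = k + 2 from rfl] at this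
      simp [h, this]

theorem altLoop_true (prev : Int) (l : List Int) :
    altLoop prev true l = strictDecFrom prev l := by
  induction l generalizing prev with
  | nil => rfl
  | cons x rest ih =>
    simp only [altLoop, strictDecFrom]
    by_cases h : x ≥ prev
    · simp [h, show ¬ (x < prev) by omega]
    · simp [h, show x < prev by omega, ih]

theorem main_lemma :
    ∀ (l : List Int) (prev : Int) (i : Nat) (s : List Int), 1 ≤ i →
    s.drop (i - 1) = prev :: l →
    (i = 1 ∨ ∃ a b r, s = a :: b :: r ∧ a < b) →
    strictDec (s.drop (auxFlip prev l i)) = (altLoop prev false l || decide (s.length ≤ 1)) := by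
  intro l
  induction l with
  | nil =>
    intro prev i s hi hdrop hinv
    simp only [auxFlip, List.drop_zero, altLoop, Bool.false_or]
    have hlen : s.length = i := by
      have := congrArg List.length hdrop
      simp at this
      omega
    rcases hinv with h1 | ⟨a, b, r, hs, hab⟩
    · subst h1
      have hs1 : s.length = 1 := by omega
      match s, hs1 with
      | [x], _ => simp [strictDec, strictDecFrom]
    · subst hs
      simp only [List.length_cons] at hlen ⊢
      simp [strictDec, strictDecFrom, show ¬ (b < a) by omega, show ¬ (r.length + 1 + 1 ≤ 1) by omega]
  | cons y r ih =>
    intro prev i s hi hdrop hinv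
    have hlen : i + r.length + 1 ≤ s.length := by
      have := congrArg List.length hdrop
      simp at this
      omega
    have hs_long : ¬ (s.length ≤ 1) := by omega
    simp only [auxFlip, altLoop]
    by_cases h : y ≤ prev
    · -- flip here: j = i; s.drop i = y :: r
      have hdi : s.drop i = y :: r := by
        have : s.drop i = (s.drop (i - 1)).drop 1 := by
          rw [List.drop_drop]; congr 1; omega
        rw [this, hdrop]; rfl
      simp [h, hdi, strictDec, altLoop_true, hs_long]
    · -- no flip: prev < y, advance
      have hdi : s.drop i = y :: r := by
        have : s.drop i = (s.drop (i - 1)).drop 1 := by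
          rw [List.drop_drop]; congr 1; omega
        rw [this, hdrop]; rfl
      have hinv' : i + 1 = 1 ∨ ∃ a b rr, s = a :: b :: rr ∧ a < b := by
        right
        rcases hinv with h1 | hex
        · subst h1
          simp at hdrop
          exact ⟨prev, y, r, hdrop, by omega⟩
        · exact hex
      have := ih y (i + 1) s (by omega) (by simpa using hdi) hinv'
      simp [h] at this ⊢
      exact this

theorem process_eq (s : List Int) : process s = process_alt s := by
  cases s with
  | nil => rfl
  | cons x rest =>
    show processLoop2 _ _ = _
    rw [loop2_strictDec]
    have hj : processLoop1 (x :: rest) (List.range' 1 ((x :: rest).length - 1))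
        = auxFlip x rest 1 := by
      have h := loop1_general (x :: rest) ((x :: rest).length - 1) 0 (by simp) (by simp)
      simpa using h
    rw [hj]
    have := main_lemma rest x 1 (x :: rest) (by omega) (by simp) (Or.inl rfl)
    rw [this]
    rfl

-- ===== VERDICT (by name: the statement is the Claim_ definition above) =====
theorem process_spec : Claim_equal_process := by
  intro s _
  unfold Spec_process
  exact process_eq s
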